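-- pv_equiv track=rewrite | github.com/hakusai22/AlgoScripts | 算法比赛/LCCUP/2_探险营地.py | adventureCamp
-- ===== SOURCE A (Python) =====
-- from typing import List
--
-- def adventureCamp(a: List[str]) -> int:
--     n = len(a)
--     st = set()
--     for i in a[0].split('->'):
--         st.add(i)
--     ans = -1
--     mx = 0
--     for i in range(1, n):
--         cur = 0
--         for j in a[i].split('->'):
--             if j and j not in st:
--                 st.add(j)
--                 cur += 1
--         if cur > mx:
--             mx = cur
--             ans = i
--     return ans
-- ===== SOURCE B (Python) =====
-- from typing import List
--
-- def adventureCamp(a: List[str]) -> int: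
--     # phase 1: first_seen maps each explorer token to the index of the first camp containing it
--     first_seen = {}
--     for tok in a[0].split('->'):
--         first_seen.setdefault(tok, 0)
--     for i in range(1, len(a)):
--         for tok in a[i].split('->'):
--             if tok and tok not in first_seen:
--                 first_seen[tok] = i
--     # phase 2: count explorers first seen at each camp
--     count = {}
--     for idx in first_seen.values():
--         count[idx] = count.get(idx, 0) + 1
--     # phase 3: first camp index with strictly maximal new-explorer count
--     ans, mx = -1, 0
--     for i in range(1, len(a)):
--         c = count.get(i, 0)
--         if c > mx:
--             ans, mx = i, c
--     return ans
-- ===== Notes on version B (the rewrite author's own statement) =====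
-- stated objective: alternative
-- what changed: A interleaves a running seen-set with the max update in one pass; B separates three phases: build a first_seen dict (explorer -> earliest camp index), tally a per-camp counter from its values, then a pure argmax scan over camp indices.
-- outside the precondition, e.g. on adventureCamp([]): A raises IndexError, B raises IndexError
import Mathlib
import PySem

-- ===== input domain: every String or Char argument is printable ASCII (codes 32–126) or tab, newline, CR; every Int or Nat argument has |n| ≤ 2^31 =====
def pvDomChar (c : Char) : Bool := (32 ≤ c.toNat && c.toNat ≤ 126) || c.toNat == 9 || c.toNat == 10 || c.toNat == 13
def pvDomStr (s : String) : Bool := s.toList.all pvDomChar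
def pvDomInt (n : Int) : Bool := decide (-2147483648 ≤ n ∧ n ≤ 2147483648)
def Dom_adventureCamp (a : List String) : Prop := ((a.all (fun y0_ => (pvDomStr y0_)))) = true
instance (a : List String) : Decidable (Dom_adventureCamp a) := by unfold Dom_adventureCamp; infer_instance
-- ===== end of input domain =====

-- B separates first_seen-dict building, value tallying and the argmax scan that A interleaves; return value proved equal on nonempty input.

-- ===== PORT A =====
-- s.split('->'): split? is `some` for every nonempty separator, so getD [] is exact
def pySplitArrow (s : String) : List String := (PySem.Str.split? s "->").getD []

def adventureCamp (a : List String) : Int :=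
  let n : Int := a.length
  let st : PySem.Set String :=
    (pySplitArrow (PySem.List.pyGetD a 0 "")).foldl
      (fun st i => PySem.Set.add st i) PySem.Set.empty
  let res :=
    (PySem.List.pyRange 1 n 1).foldl
      (fun (acc : PySem.Set String × Int × Int) i =>
        let inner : PySem.Set String × Int :=
          (pySplitArrow (PySem.List.pyGetD a i "")).foldl
            (fun (p : PySem.Set String × Int) j =>
              if j != "" && !(PySem.Set.contains p.1 j) then (PySem.Set.add p.1 j, p.2 + 1) else p)
            (acc.1, 0)
        if inner.2 > acc.2.2 then (inner.1, i, inner.2) else (inner.1, acc.2.1, acc.2.2))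
      (st, -1, 0)
  res.2.1

-- ===== PORT B =====
def adventureCamp_alt (a : List String) : Int :=
  let firstSeen0 : PySem.Dict String Int :=
    (pySplitArrow (PySem.List.pyGetD a 0 "")).foldl
      (fun d tok => d.setdefault tok 0) PySem.Dict.empty
  let firstSeen : PySem.Dict String Int :=
    (PySem.List.pyRange 1 (a.length : Int) 1).foldl
      (fun d i =>
        (pySplitArrow (PySem.List.pyGetD a i "")).foldl
          (fun d tok => if tok != "" && !(d.contains tok) then d.insert tok i else d) d)
      firstSeen0
  let count : PySem.Dict Int Int :=
    firstSeen.values.foldl (fun c idx => c.insert idx (c.getD idx 0 + 1)) PySem.Dict.empty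
  let res :=
    (PySem.List.pyRange 1 (a.length : Int) 1).foldl
      (fun (p : Int × Int) i =>
        let c := count.getD i 0
        if c > p.2 then (i, c) else p)
      (-1, 0)
  res.1

-- ===== PRECONDITION & SPEC =====
-- Pre_ excludes the empty list, on which A (and B) raise IndexError at a[0].
def Pre_adventureCamp (a : List String) : Prop := a ≠ []
instance (a : List String) : Decidable (Pre_adventureCamp a) := by unfold Pre_adventureCamp; infer_instance
def pvWitness_adventureCamp : List String := ["a->b", "b->c"]
def Spec_adventureCamp (a : List String) (out : Int) : Prop := out = adventureCamp_alt a
instance (a : List String) (out : Int) : Decidable (Spec_adventureCamp a out) := by unfold Spec_adventureCamp; infer_instance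

-- ===== CLAIM (what is proved, stated in full; the proofs are below) =====
def Claim_equal_adventureCamp : Prop := ∀ (a : List String), Dom_adventureCamp a → Pre_adventureCamp a → Spec_adventureCamp a (adventureCamp a)

-- ===== LEMMAS AND PROOFS =====

def toksAt (a : List String) (i : Int) : List String := pySplitArrow (PySem.List.pyGetD a i "")

def news (st : List String) : List String → List String
  | [] => []
  | t :: ts => if t != "" && !(PySem.Set.contains st t) then t :: news (st ++ [t]) ts else news st ts

theorem innerA (ts : List String) : ∀ (st : PySem.Set String) (c : Int),
    ts.foldl (fun (p : PySem.Set String × Int) j =>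
      if j != "" && !(PySem.Set.contains p.1 j) then (PySem.Set.add p.1 j, p.2 + 1) else p) (st, c)
    = (st ++ news st ts, c + ((news st ts).length : Int)) := by
  induction ts with
  | nil => intro st c; simp [news]
  | cons t ts ih =>
    intro st c
    by_cases h : (t != "" && !(PySem.Set.contains st t)) = true
    · have hmem : t ∉ st := by
        have := h; simp at this
        intro hm
        exact absurd ((PySem.Set.contains_iff st t).mpr hm) (by simp [this.2])
      simp only [List.foldl_cons, news, h, if_pos]
      rw [PySem.Set.add_of_not_mem hmem]
      rw [ih (st ++ [t]) (c + 1)]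
      simp
      omega
    · simp only [List.foldl_cons, news, h]
      simp only [Bool.not_eq_true] at h
      rw [if_neg (by simp)]
      exact ih st c

theorem dictContains_eq_setContains (d : PySem.Dict String Int) (st : List String)
    (h : d.keys = st) (t : String) : d.contains t = PySem.Set.contains st t := by
  by_cases hm : t ∈ st
  · rw [(PySem.Dict.contains_iff_mem_keys d t).mpr (h ▸ hm), (PySem.Set.contains_iff st t).mpr hm]
  · have h1 : d.contains t = false := by
      cases hc : d.contains t
      · rfl
      · exact absurd (h ▸ (PySem.Dict.contains_iff_mem_keys d t).mp hc) hm
    have h2 : PySem.Set.contains st t = false := by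
      cases hc : PySem.Set.contains st t
      · rfl
      · exact absurd ((PySem.Set.contains_iff st t).mp hc) hm
    rw [h1, h2]

theorem innerB (i : Int) (ts : List String) : ∀ (d : PySem.Dict String Int) (st : List String),
    d.keys = st →
    (ts.foldl (fun d tok => if tok != "" && !(d.contains tok) then d.insert tok i else d) d).items
    = d.items ++ (news st ts).map (fun t => (t, i)) := by
  induction ts with
  | nil => intro d st h; simp [news]
  | cons t ts ih =>
    intro d st h
    rw [List.foldl_cons]
    have hbody : (if (t != "" && !(d.contains t)) = true then d.insert t i else d)
        = if (t != "" && !(PySem.Set.contains st t)) = true then d.insert t i else d := by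
      rw [dictContains_eq_setContains d st h]
    rw [hbody]
    by_cases hc : (t != "" && !(PySem.Set.contains st t)) = true
    · have hnc : d.contains t = false := by
        rw [dictContains_eq_setContains d st h]; simp at hc; simp [hc.2]
      have hkeys : (d.insert t i).keys = st ++ [t] := by
        rw [PySem.Dict.keys_insert_of_not_contains _ _ hnc, h]
      simp only [news, hc, if_pos]
      rw [ih (d.insert t i) (st ++ [t]) hkeys]
      rw [PySem.Dict.items_insert_of_not_contains _ _ hnc]
      simp
    · simp only [news, hc]
      exact ih d st h

theorem setdefault0_keys (ts : List String) : ∀ (d : PySem.Dict String Int),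
    (ts.foldl (fun d tok => d.setdefault tok 0) d).keys = PySem.Set.update d.keys ts := by
  induction ts with
  | nil => intro d; simp [PySem.Set.update_nil]
  | cons t ts ih =>
    intro d
    rw [List.foldl_cons, PySem.Set.update_cons]
    cases hc : d.contains t with
    | true =>
      rw [PySem.Dict.setdefault_of_contains d 0 hc,
        PySem.Set.add_of_mem ((PySem.Dict.contains_iff_mem_keys d t).mp hc), ih d]
    | false =>
      rw [PySem.Dict.setdefault_of_not_contains d 0 hc, ih (d.insert t 0),
        PySem.Dict.keys_insert_of_not_contains _ _ hc,
        PySem.Set.add_of_not_mem (fun hm => by simp [(PySem.Dict.contains_iff_mem_keys d t).mpr hm] at hc)]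

theorem setdefault0_values (ts : List String) : ∀ (d : PySem.Dict String Int),
    (∀ v ∈ d.values, v = 0) → ∀ v ∈ (ts.foldl (fun d tok => d.setdefault tok 0) d).values, v = 0 := by
  induction ts with
  | nil => intro d h; exact h
  | cons t ts ih =>
    intro d h
    rw [List.foldl_cons]
    cases hc : d.contains t with
    | true => rw [PySem.Dict.setdefault_of_contains d 0 hc]; exact ih d h
    | false =>
      rw [PySem.Dict.setdefault_of_not_contains d 0 hc]
      refine ih (d.insert t 0) ?_
      intro v hv
      have : (d.insert t 0).values = d.values ++ [0] := by
        show ((d.insert t 0).items).map Prod.snd = _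
        rw [PySem.Dict.items_insert_of_not_contains _ _ hc]
        simp [PySem.Dict.values]
      rw [this] at hv
      rcases List.mem_append.mp hv with h1 | h1
      · exact h v h1
      · simpa using h1

def segs (a : List String) (st : List String) : List Int → List (Int × Nat)
  | [] => []
  | i :: l => (i, (news st (toksAt a i)).length) :: segs a (st ++ news st (toksAt a i)) l

def flatSegs (a : List String) (st : List String) : List Int → List (String × Int)
  | [] => []
  | i :: l => (news st (toksAt a i)).map (fun t => (t, i)) ++ flatSegs a (st ++ news st (toksAt a i)) l

theorem segs_fst (a : List String) (l : List Int) : ∀ st, (segs a st l).map Prod.fst = l := by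
  induction l with
  | nil => intro st; simp [segs]
  | cons i l ih => intro st; simp [segs, ih]

theorem outerA' (a : List String) (l : List Int) : ∀ (st : PySem.Set String) (ans mx : Int),
    (l.foldl (fun (acc : PySem.Set String × Int × Int) i =>
        if ((news acc.1 (toksAt a i)).length : Int) > acc.2.2
          then (acc.1 ++ news acc.1 (toksAt a i), i, ((news acc.1 (toksAt a i)).length : Int))
          else (acc.1 ++ news acc.1 (toksAt a i), acc.2.1, acc.2.2))
      (st, ans, mx)).2
    = (segs a st l).foldl (fun (p : Int × Int) q =>
        if (q.2 : Int) > p.2 then (q.1, (q.2 : Int)) else p) (ans, mx) := by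
  induction l with
  | nil => intro st ans mx; simp [segs]
  | cons i l ih =>
    intro st ans mx
    rw [List.foldl_cons, segs, List.foldl_cons]
    dsimp only
    split_ifs with hc
    · exact ih _ i _
    · exact ih _ ans mx

theorem outerA (a : List String) (l : List Int) (st : PySem.Set String) (ans mx : Int) :
    (l.foldl (fun (acc : PySem.Set String × Int × Int) i =>
        let inner : PySem.Set String × Int :=
          (toksAt a i).foldl
            (fun (p : PySem.Set String × Int) j =>
              if j != "" && !(PySem.Set.contains p.1 j) then (PySem.Set.add p.1 j, p.2 + 1) else p)
            (acc.1, 0)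
        if inner.2 > acc.2.2 then (inner.1, i, inner.2) else (inner.1, acc.2.1, acc.2.2))
      (st, ans, mx)).2
    = (segs a st l).foldl (fun (p : Int × Int) q =>
        if (q.2 : Int) > p.2 then (q.1, (q.2 : Int)) else p) (ans, mx) := by
  have hbody : (fun (acc : PySem.Set String × Int × Int) i =>
        let inner : PySem.Set String × Int :=
          (toksAt a i).foldl
            (fun (p : PySem.Set String × Int) j =>
              if j != "" && !(PySem.Set.contains p.1 j) then (PySem.Set.add p.1 j, p.2 + 1) else p)
            (acc.1, 0)
        if inner.2 > acc.2.2 then (inner.1, i, inner.2) else (inner.1, acc.2.1, acc.2.2))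
      = (fun (acc : PySem.Set String × Int × Int) i =>
        if ((news acc.1 (toksAt a i)).length : Int) > acc.2.2
          then (acc.1 ++ news acc.1 (toksAt a i), i, ((news acc.1 (toksAt a i)).length : Int))
          else (acc.1 ++ news acc.1 (toksAt a i), acc.2.1, acc.2.2)) := by
    funext acc i
    simp only [innerA, zero_add]
  rw [hbody]
  exact outerA' a l st ans mx

theorem outerB (a : List String) (l : List Int) : ∀ (d : PySem.Dict String Int) (st : List String),
    d.keys = st →
    (l.foldl (fun d i =>
        (toksAt a i).foldl
          (fun d tok => if tok != "" && !(d.contains tok) then d.insert tok i else d) d) d).items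
    = d.items ++ flatSegs a st l := by
  induction l with
  | nil => intro d st h; simp [flatSegs]
  | cons i l ih =>
    intro d st h
    rw [List.foldl_cons, flatSegs]
    set d' := (toksAt a i).foldl
      (fun d tok => if tok != "" && !(d.contains tok) then d.insert tok i else d) d with hd'
    have hitems : d'.items = d.items ++ (news st (toksAt a i)).map (fun t => (t, i)) :=
      innerB i (toksAt a i) d st h
    have hkeys : d'.keys = st ++ news st (toksAt a i) := by
      show d'.items.map Prod.fst = _
      rw [hitems, List.map_append, show d.items.map Prod.fst = d.keys from rfl, h]
      simp [Function.comp_def]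
    rw [ih d' _ hkeys, hitems, List.append_assoc]

theorem count_flatSegs_not_mem (a : List String) (l : List Int) : ∀ (st : List String) (i : Int),
    i ∉ l → List.count i ((flatSegs a st l).map Prod.snd) = 0 := by
  induction l with
  | nil => intro st i _; simp [flatSegs]
  | cons j l ih =>
    intro st i hi
    rw [flatSegs, List.map_append, List.count_append]
    rw [ih _ i (fun h => hi (List.mem_cons_of_mem _ h))]
    have : ((news st (toksAt a j)).map (fun t => (t, j))).map Prod.snd
        = List.replicate (news st (toksAt a j)).length j := by
      simp [List.map_map, Function.comp_def, List.map_const']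
    rw [this, List.count_replicate]
    simp
    intro h
    exact absurd (h ▸ List.mem_cons_self) hi

theorem count_flatSegs_mem (a : List String) (l : List Int) : ∀ (st : List String),
    l.Nodup → ∀ q ∈ segs a st l, List.count q.1 ((flatSegs a st l).map Prod.snd) = q.2 := by
  induction l with
  | nil => intro st _ q hq; simp [segs] at hq
  | cons j l ih =>
    intro st hnd q hq
    rw [flatSegs, List.map_append, List.count_append]
    have hrep : ((news st (toksAt a j)).map (fun t => (t, j))).map Prod.snd
        = List.replicate (news st (toksAt a j)).length j := by
      simp [List.map_map, Function.comp_def, List.map_const']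
    rw [hrep]
    rw [segs] at hq
    rcases List.mem_cons.mp hq with h1 | h1
    · subst h1
      rw [List.count_replicate]
      simp
      exact count_flatSegs_not_mem a l _ j (List.nodup_cons.mp hnd).1
    · have hq1 : q.1 ∈ l := by
        have := List.mem_map_of_mem (f := Prod.fst) h1
        rwa [segs_fst] at this
      have hne : j ≠ q.1 := fun h => (List.nodup_cons.mp hnd).1 (h ▸ hq1)
      rw [List.count_replicate, if_neg (by simpa using hne)]
      rw [ih _ (List.nodup_cons.mp hnd).2 q h1]
      omega

theorem argmax_congr (sg : List (Int × Nat)) (g : Int → Int) : ∀ (p : Int × Int),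
    (∀ q ∈ sg, g q.1 = (q.2 : Int)) →
    sg.foldl (fun (p : Int × Int) q => if (q.2 : Int) > p.2 then (q.1, (q.2 : Int)) else p) p
    = (sg.map Prod.fst).foldl (fun (p : Int × Int) i => if g i > p.2 then (i, g i) else p) p := by
  induction sg with
  | nil => intro p _; simp
  | cons q sg ih =>
    intro p h
    rw [List.map_cons, List.foldl_cons, List.foldl_cons]
    rw [h q List.mem_cons_self]
    exact ih _ (fun r hr => h r (List.mem_cons_of_mem _ hr))

theorem adventureCamp_eq_alt (a : List String) : adventureCamp a = adventureCamp_alt a := by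
  unfold adventureCamp adventureCamp_alt
  dsimp only
  have htoks : ∀ i : Int, pySplitArrow (PySem.List.pyGetD a i "") = toksAt a i := fun i => rfl
  simp only [htoks]
  set ts0 := toksAt a 0 with hts0
  set l := PySem.List.pyRange 1 (a.length : Int) 1 with hl
  have hseed : ts0.foldl (fun st i => PySem.Set.add st i) PySem.Set.empty = PySem.Set.ofList ts0 :=
    (PySem.Set.ofList_eq_foldl ts0).symm
  rw [hseed]
  set st0 : PySem.Set String := PySem.Set.ofList ts0 with hst0
  set fs0 : PySem.Dict String Int := ts0.foldl (fun d tok => d.setdefault tok 0) PySem.Dict.empty with hfs0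
  have hkeys0 : fs0.keys = st0 := by
    rw [hfs0, setdefault0_keys]
    rw [show PySem.Dict.empty.keys = ([] : List String) from rfl, PySem.Set.update_nil_left]
  set fs : PySem.Dict String Int := l.foldl (fun d i =>
      (toksAt a i).foldl
        (fun d tok => if tok != "" && !(d.contains tok) then d.insert tok i else d) d) fs0 with hfs
  have hitems : fs.items = fs0.items ++ flatSegs a st0 l := outerB a l fs0 st0 hkeys0
  have hvals0 : ∀ v ∈ fs0.values, v = 0 := by
    rw [hfs0]
    refine setdefault0_values ts0 PySem.Dict.empty ?_
    intro v hv
    rw [show PySem.Dict.empty.values = ([] : List Int) from rfl] at hv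
    simp at hv
  have hcount : ∀ q ∈ segs a st0 l,
      (PySem.Dict.counter fs.values).getD q.1 0 = (q.2 : Int) := by
    intro q hq
    have hq1l : q.1 ∈ l := by
      have := List.mem_map_of_mem (f := Prod.fst) hq
      rwa [segs_fst] at this
    have hq1pos : 1 ≤ q.1 := (PySem.List.mem_pyRange_one.mp (hl ▸ hq1l)).1
    rw [PySem.Dict.getD_counter]
    have hv : fs.values = fs0.values ++ (flatSegs a st0 l).map Prod.snd := by
      show fs.items.map Prod.snd = _
      rw [hitems, List.map_append]
      rfl
    rw [hv, List.count_append]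
    have hz : List.count q.1 fs0.values = 0 := by
      rw [List.count_eq_zero]
      intro hm
      have := hvals0 _ hm
      omega
    rw [hz, count_flatSegs_mem a l st0 (by rw [hl]; exact PySem.List.nodup_pyRange_one 1 _) q hq]
    simp
  rw [outerA a l st0 (-1) 0]
  rw [PySem.Dict.foldl_insert_getD_add_one_eq_counter]
  have hcongr := argmax_congr (segs a st0 l) (fun i => (PySem.Dict.counter fs.values).getD i 0)
      (-1, 0) hcount
  rw [segs_fst] at hcongr
  rw [hcongr]

-- ===== VERDICT (by name: the statement is the Claim_ definition above) =====
theorem adventureCamp_spec : Claim_equal_adventureCamp := by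
  intro a _ _
  unfold Spec_adventureCamp
  exact adventureCamp_eq_alt a
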